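-- pv_equiv track=rewrite | github.com/Blackspirits/podcast-downloader | podcast_downloader/downloaded.py | get_last_downloaded_file_before_gap
-- ===== SOURCE A (Python) =====
-- from typing import Callable, Iterable, List, Set
--
-- def get_last_downloaded_file_before_gap(
--     feed_files: List[str], downloaded_files: Iterable[str]
-- ) -> str:
--     """
--     Finds the last successfully downloaded file in a sequence before a missing file (a "gap").
--
--     This helps in resuming downloads to fill in missing episodes instead of only
--     downloading the newest ones.
--
--     Args:
--         feed_files: A list of all filenames as they appear in the RSS feed (ordered).
--         downloaded_files: An iterable of filenames that exist on disk.
--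
--     Returns:
--         The filename of the last downloaded file before the first gap, or None if no gaps are found
--         after the first downloaded file.
--     """
--     last_seen_downloaded_file = None
--     # Using a set provides fast O(1) average time complexity for lookups.
--     all_downloaded_files: Set[str] = set(downloaded_files)
--
--     for feed_file_name in feed_files:
--         if feed_file_name in all_downloaded_files:
--             last_seen_downloaded_file = feed_file_name
--         else:
--             # We found a file from the feed that is NOT downloaded.
--             # If we have seen a downloaded file before this one, it's the one before the gap.
--             if last_seen_downloaded_file is not None:
--                 return last_seen_downloaded_file
--
--     # If the loop completes, it means there were no gaps after the first downloaded file.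
--     # We return the last file we saw, which will be the latest downloaded file in the feed.
--     return last_seen_downloaded_file
-- ===== SOURCE B (Python) =====
-- def get_last_downloaded_file_before_gap(feed_files, downloaded_files):
--     downloaded = set(downloaded_files)
--     mask = [f in downloaded for f in feed_files]
--     i0 = next((i for i, b in enumerate(mask) if b), None)
--     if i0 is None:
--         return None
--     k = next((j for j, b in enumerate(mask[i0:]) if not b), None)
--     if k is None:
--         return feed_files[-1]
--     return feed_files[i0 + k - 1]
-- ===== Notes on version B (the rewrite author's own statement) =====
-- stated objective: alternative
-- what changed: Instead of A's single branching accumulator loop with early return, B materialises a boolean downloaded-mask, locates the first True index i0 and the first False offset k within mask[i0:], and answers by direct index arithmetic feed_files[i0+k-1] (or feed_files[-1] when no gap).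
import Mathlib
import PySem

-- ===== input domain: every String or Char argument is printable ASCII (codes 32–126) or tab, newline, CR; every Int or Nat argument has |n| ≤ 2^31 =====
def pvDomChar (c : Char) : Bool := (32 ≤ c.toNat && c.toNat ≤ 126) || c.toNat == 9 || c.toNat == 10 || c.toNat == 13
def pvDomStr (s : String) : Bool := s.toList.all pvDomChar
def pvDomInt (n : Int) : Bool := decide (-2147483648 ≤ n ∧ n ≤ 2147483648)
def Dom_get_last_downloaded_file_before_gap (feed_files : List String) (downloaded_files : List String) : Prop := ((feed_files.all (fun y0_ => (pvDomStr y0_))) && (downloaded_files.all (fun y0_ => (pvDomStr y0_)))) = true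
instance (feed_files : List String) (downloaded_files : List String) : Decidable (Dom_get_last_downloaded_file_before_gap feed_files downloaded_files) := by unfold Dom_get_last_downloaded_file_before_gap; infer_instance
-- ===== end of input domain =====

-- B replaces A's single branching accumulator loop by an index computation over a boolean
-- downloaded-mask (first True index, first False offset after it, then direct indexing);
-- same O(n) cost, alternative algorithmic decomposition.


-- ===== PORT A =====
-- A: single loop over feed_files with a `last_seen_downloaded_file` accumulator;
-- early `return` becomes the `some v` branch of the recursion.
def pvGapLoop (ds : PySem.Set String) : List String → Option String → Option String
  | [], last => last
  | f :: rest, last =>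
    if PySem.Set.contains ds f then pvGapLoop ds rest (some f)
    else match last with
      | some v => some v
      | none => pvGapLoop ds rest none

def get_last_downloaded_file_before_gap (feed_files : List String) (downloaded_files : List String) : Option String :=
  pvGapLoop (PySem.Set.ofList downloaded_files) feed_files none

-- ===== PORT B =====
-- B: boolean mask of feed_files; i0 = first True index, k = first False offset in mask[i0:];
-- answer feed_files[i0 + k - 1], or feed_files[-1] when no False follows, or none when no True.
def get_last_downloaded_file_before_gap_alt (feed_files : List String) (downloaded_files : List String) : Option String :=
  let ds := PySem.Set.ofList downloaded_files
  let mask := feed_files.map (fun f => PySem.Set.contains ds f)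
  match mask.findIdx? (fun b => b) with
  | none => none
  | some i0 =>
    match (mask.drop i0).findIdx? (fun b => !b) with
    | none => PySem.List.pyGet? feed_files (-1)
    | some k => PySem.List.pyGet? feed_files ((i0 : Int) + (k : Int) - 1)

-- ===== PRECONDITION & SPEC =====
def Spec_get_last_downloaded_file_before_gap (feed_files : List String) (downloaded_files : List String) (out : Option String) : Prop := out = get_last_downloaded_file_before_gap_alt feed_files downloaded_files
instance (feed_files : List String) (downloaded_files : List String) (out : Option String) : Decidable (Spec_get_last_downloaded_file_before_gap feed_files downloaded_files out) := by unfold Spec_get_last_downloaded_file_before_gap; infer_instance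

-- ===== CLAIM =====
def Claim_equal_get_last_downloaded_file_before_gap : Prop := ∀ (feed_files : List String) (downloaded_files : List String), Dom_get_last_downloaded_file_before_gap feed_files downloaded_files → Spec_get_last_downloaded_file_before_gap feed_files downloaded_files (get_last_downloaded_file_before_gap feed_files downloaded_files)

-- ===== LEMMAS AND PROOFS =====

-- With a downloaded file already seen (accumulator `some f`), A's loop returns the last
-- element of the contiguous run of downloaded files, located by the first False offset.
theorem pvGapLoop_some (ds : PySem.Set String) (rest : List String) (f : String) :
    pvGapLoop ds rest (some f)
      = match (rest.map (fun g => PySem.Set.contains ds g)).findIdx? (fun b => !b) with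
        | none => (f :: rest).getLast?
        | some k => PySem.List.pyGet? (f :: rest) (k : Int) := by
  induction rest generalizing f with
  | nil => rfl
  | cons g rest' ih =>
    by_cases h : PySem.Set.contains ds g = true
    · simp only [pvGapLoop, h, if_true, List.map_cons, List.findIdx?_cons, Bool.not_true, ih g]
      cases hk : (rest'.map (fun g => PySem.Set.contains ds g)).findIdx? (fun b => !b) with
      | none =>
        simp [List.getLast?_cons_cons]
      | some k =>
        simp only [Option.map_some, Bool.false_eq_true, if_false]
        rw [show ((k + 1 : Nat) : Int) = (k : Int) + 1 by push_cast; ring,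
          PySem.List.pyGet?_cons_succ]
    · rw [Bool.not_eq_true] at h
      simp only [pvGapLoop, h, Bool.false_eq_true, if_false, List.map_cons,
        List.findIdx?_cons, Bool.not_false]
      simp [PySem.List.pyGet?_zero_cons]

-- If the first True in a boolean list is at index i, the list dropped at i starts with True.
theorem pvFindTrueDrop (l : List Bool) (i : Nat) (h : l.findIdx? (fun b => b) = some i) :
    l.drop i = true :: l.drop (i + 1) := by
  induction l generalizing i with
  | nil => simp at h
  | cons a t ih =>
    rw [List.findIdx?_cons] at h
    cases a with
    | true =>
      simp only [if_pos] at h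
      have : i = 0 := by simpa using h.symm
      subst this
      simp
    | false =>
      simp only [Bool.false_eq_true, if_false] at h
      cases ht : t.findIdx? (fun b => b) with
      | none => rw [ht] at h; simp at h
      | some j =>
        rw [ht] at h
        simp only [Option.map_some, Option.some.injEq] at h
        subst h
        simpa using ih j ht

-- With nothing seen yet, A's loop equals B's index computation.
theorem pvGapLoop_none (ds : PySem.Set String) (feed : List String) :
    pvGapLoop ds feed none
      = match (feed.map (fun g => PySem.Set.contains ds g)).findIdx? (fun b => b) with
        | none => none
        | some i0 =>
          match ((feed.map (fun g => PySem.Set.contains ds g)).drop i0).findIdx? (fun b => !b) with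
          | none => PySem.List.pyGet? feed (-1)
          | some k => PySem.List.pyGet? feed ((i0 : Int) + (k : Int) - 1) := by
  induction feed with
  | nil => rfl
  | cons f rest ih =>
    by_cases h : PySem.Set.contains ds f = true
    · simp only [pvGapLoop, h, if_true, List.map_cons, List.findIdx?_cons,
        List.drop_zero, Bool.not_true, pvGapLoop_some]
      cases hk : (rest.map (fun g => PySem.Set.contains ds g)).findIdx? (fun b => !b) with
      | none => simp [PySem.List.pyGet?_neg_one]
      | some k =>
        simp only [Option.map_some, Bool.false_eq_true, if_false]
        rw [show ((0 : Nat) : Int) + ((k + 1 : Nat) : Int) - 1 = (k : Int) by push_cast; ring]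
    · rw [Bool.not_eq_true] at h
      simp only [pvGapLoop, h, Bool.false_eq_true, if_false, List.map_cons,
        List.findIdx?_cons, ih]
      cases hi : (rest.map (fun g => PySem.Set.contains ds g)).findIdx? (fun b => b) with
      | none => simp
      | some i0 =>
        simp only [Option.map_some, List.drop_succ_cons]
        have hne : rest ≠ [] := by intro hr; subst hr; simp at hi
        have hd := pvFindTrueDrop _ _ hi
        rw [hd, List.findIdx?_cons]
        simp only [Bool.not_true, Bool.false_eq_true, if_false]
        cases hk : (List.drop (i0 + 1) (rest.map (fun g => PySem.Set.contains ds g))).findIdx? (fun b => !b) with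
        | none =>
          simp only [Option.map_none]
          obtain ⟨r, rs, rfl⟩ := List.exists_cons_of_ne_nil hne
          simp [PySem.List.pyGet?_neg_one, List.getLast?_cons_cons]
        | some k =>
          simp only [Option.map_some]
          rw [show ((i0 + 1 : Nat) : Int) + ((k + 1 : Nat) : Int) - 1 = ((i0 + k : Nat) : Int) + 1 by push_cast; ring,
            PySem.List.pyGet?_cons_succ,
            show ((i0 : Nat) : Int) + ((k + 1 : Nat) : Int) - 1 = ((i0 + k : Nat) : Int) by push_cast; ring]

-- ===== VERDICT =====
theorem get_last_downloaded_file_before_gap_spec : Claim_equal_get_last_downloaded_file_before_gap := by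
  intro feed_files downloaded_files _
  unfold Spec_get_last_downloaded_file_before_gap
  unfold get_last_downloaded_file_before_gap get_last_downloaded_file_before_gap_alt
  exact pvGapLoop_none _ _
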